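-- pv_equiv track=rewrite | github.com/stancld/rossum-mcp | rossum-agent/rossum_agent/hook_analysis_tools.py | _detect_workflow_clusters
-- ===== SOURCE A (Python) =====
-- from typing import Any
--
-- def _detect_workflow_clusters(execution_phases: list[dict[str, Any]]) -> list[list[dict[str, Any]]]:
--     """Detect groups of related events (clusters) in the workflow.
--
--     Events are considered related if they are consecutive in the standard lifecycle.
--     A gap of 2+ events in the standard order creates a new cluster.
--     """
--     if not execution_phases:
--         return []
--
--     # Standard event order for reference
--     event_order = [
--         "annotation_status.importing",
--         "annotation_content.initialize",
--         "annotation_content.started",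
--         "annotation_content.updated",
--         "annotation_status.to_review",
--         "annotation_status.changed",
--         "annotation_content.confirm",
--         "annotation_content.export",
--         "annotation_status.exporting",
--         "annotation_status.exported",
--         "datapoint_value",
--     ]
--
--     # Get positions of each event in the standard order
--     phase_positions = []
--     for phase in execution_phases:
--         event = phase["event"]
--         if event in event_order:
--             phase_positions.append((event_order.index(event), phase))
--         else:
--             # Custom events get placed at the end
--             phase_positions.append((len(event_order), phase))
--
--     # Sort by position
--     phase_positions.sort(key=lambda x: x[0])
--
--     # Detect clusters based on gaps
--     clusters: list[list[dict[str, Any]]] = []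
--     current_cluster: list[dict[str, Any]] = []
--     prev_position = -1
--
--     for position, phase in phase_positions:
--         # If there's a gap of 2+ positions, start a new cluster
--         if prev_position != -1 and position - prev_position > 2:
--             if current_cluster:
--                 clusters.append(current_cluster)
--             current_cluster = [phase]
--         else:
--             current_cluster.append(phase)
--         prev_position = position
--
--     # Add the last cluster
--     if current_cluster:
--         clusters.append(current_cluster)
--
--     return clusters
-- ===== SOURCE B (Python) =====
-- def _detect_workflow_clusters(execution_phases):
--     """Group events by lifecycle position buckets, then sweep positions once,
--     starting a new cluster whenever a gap of more than 2 positions appears."""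
--     event_order = [
--         "annotation_status.importing",
--         "annotation_content.initialize",
--         "annotation_content.started",
--         "annotation_content.updated",
--         "annotation_status.to_review",
--         "annotation_status.changed",
--         "annotation_content.confirm",
--         "annotation_content.export",
--         "annotation_status.exporting",
--         "annotation_status.exported",
--         "datapoint_value",
--     ]
--     pos_map = {e: i for i, e in enumerate(event_order)}
--     npos = len(event_order) + 1  # unknown events go to the last position
--
--     clusters, current, last = [], [], -1
--     for pos in range(npos):
--         bucket = [ph for ph in execution_phases if pos_map.get(ph["event"], npos - 1) == pos]
--         if not bucket:
--             continue
--         if last != -1 and pos - last > 2: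
--             clusters.append(current)
--             current = bucket
--         else:
--             current = current + bucket
--         last = pos
--     if current:
--         clusters.append(current)
--     return clusters
-- ===== Notes on version B (the rewrite author's own statement) =====
-- stated objective: alternative
-- what changed: Replaces A's build-(position,phase)-pairs + stable sort + separate gap scan by a direct bucket decomposition: events are grouped per lifecycle position (dict position map, unknowns to the last bucket) and one sweep over the 12 positions merges bucket collection with the gap-based cluster split; Pre_ excludes only phases without an 'event' key, on which both A and B raise KeyError.
import Mathlib
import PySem

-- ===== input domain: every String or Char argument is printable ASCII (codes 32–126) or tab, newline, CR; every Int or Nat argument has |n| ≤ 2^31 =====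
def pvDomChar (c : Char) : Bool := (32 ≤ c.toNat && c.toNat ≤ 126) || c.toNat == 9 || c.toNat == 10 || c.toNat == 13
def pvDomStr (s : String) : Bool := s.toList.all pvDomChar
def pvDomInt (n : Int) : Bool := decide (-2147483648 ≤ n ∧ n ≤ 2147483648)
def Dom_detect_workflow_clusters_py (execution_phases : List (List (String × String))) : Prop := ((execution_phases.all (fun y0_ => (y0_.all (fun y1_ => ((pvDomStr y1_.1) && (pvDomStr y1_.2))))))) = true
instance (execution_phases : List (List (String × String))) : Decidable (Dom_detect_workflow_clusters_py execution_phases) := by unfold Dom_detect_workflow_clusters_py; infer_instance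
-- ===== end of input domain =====

-- B replaces A's (position,phase)-pairing + stable sort + separate gap scan by per-position
-- buckets and a single sweep over the 12 lifecycle positions (objective: alternative).


-- ===== PORT A =====
-- the shared constant event_order (identical literal in A and B)
def pvEventOrder : List String :=
  ["annotation_status.importing", "annotation_content.initialize", "annotation_content.started",
   "annotation_content.updated", "annotation_status.to_review", "annotation_status.changed",
   "annotation_content.confirm", "annotation_content.export", "annotation_status.exporting",
   "annotation_status.exported", "datapoint_value"]

-- A: position of a phase: `event_order.index(event)` if present else `len(event_order)`
-- (phase["event"]: first-match lookup; `none` is Python's KeyError, excluded by Pre_; the 0 there is arbitrary)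
def pvAPos (phase : List (String × String)) : Int :=
  match List.lookup "event" phase with
  | none => 0
  | some ev =>
    match PySem.List.index? pvEventOrder ev with
    | some i => (i : Int)
    | none => (11 : Int)

-- A's gap-scan loop body over the sorted (position, phase) pairs
def pvAStep
    (st : List (List (List (String × String))) × List (List (String × String)) × Int)
    (e : Int × List (String × String)) :
    List (List (List (String × String))) × List (List (String × String)) × Int :=
  if st.2.2 ≠ -1 ∧ e.1 - st.2.2 > 2 then
    ((if st.2.1 ≠ [] then st.1 ++ [st.2.1] else st.1), [e.2], e.1)
  else
    (st.1, st.2.1 ++ [e.2], e.1)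

def detect_workflow_clusters_py (execution_phases : List (List (String × String))) :
    List (List (List (String × String))) :=
  if execution_phases = [] then []
  else
    let phase_positions := execution_phases.map (fun ph => (pvAPos ph, ph))
    let sortedPP := PySem.List.sorted phase_positions (fun e => e.1)
    let r := sortedPP.foldl pvAStep ([], [], -1)
    if r.2.1 ≠ [] then r.1 ++ [r.2.1] else r.1

-- ===== PORT B =====
-- B: {e: i for i, e in enumerate(event_order)}
def pvPosMap : PySem.Dict String Int :=
  (PySem.List.enumerate pvEventOrder).foldl (fun d ie => d.insert ie.2 ie.1) PySem.Dict.empty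

-- B: pos_map.get(ph["event"], 11)  (`none` on the lookup is Python's KeyError, excluded by Pre_)
def pvBPos (phase : List (String × String)) : Int :=
  match List.lookup "event" phase with
  | none => 11
  | some ev => pvPosMap.getD ev 11

-- B: the bucket comprehension for position p
def pvBBucket (execution_phases : List (List (String × String))) (p : Int) :
    List (List (String × String)) :=
  execution_phases.filter (fun ph => pvBPos ph == p)

-- B's sweep body over positions 0..11
def pvBStep (execution_phases : List (List (String × String)))
    (st : List (List (List (String × String))) × List (List (String × String)) × Int)
    (p : Int) :
    List (List (List (String × String))) × List (List (String × String)) × Int :=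
  let bucket := pvBBucket execution_phases p
  if bucket = [] then st
  else if st.2.2 ≠ -1 ∧ p - st.2.2 > 2 then (st.1 ++ [st.2.1], bucket, p)
  else (st.1, st.2.1 ++ bucket, p)

def detect_workflow_clusters_py_alt (execution_phases : List (List (String × String))) :
    List (List (List (String × String))) :=
  let r := (PySem.List.pyRange 0 12 1).foldl (pvBStep execution_phases) ([], [], -1)
  if r.2.1 ≠ [] then r.1 ++ [r.2.1] else r.1

-- ===== PRECONDITION & SPEC =====
-- Pre_ excludes exactly the phases without an "event" key, on which Python A raises KeyError.
def Pre_detect_workflow_clusters_py (execution_phases : List (List (String × String))) : Prop :=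
  ∀ phase ∈ execution_phases, (List.lookup "event" phase).isSome
instance (execution_phases : List (List (String × String))) : Decidable (Pre_detect_workflow_clusters_py execution_phases) := by unfold Pre_detect_workflow_clusters_py; infer_instance

def pvWitness_detect_workflow_clusters_py : (List (List (String × String))) :=
  [[("event", "datapoint_value")], [("event", "annotation_status.importing")]]

def Spec_detect_workflow_clusters_py (execution_phases : List (List (String × String))) (out : List (List (List (String × String)))) : Prop := out = detect_workflow_clusters_py_alt execution_phases
instance (execution_phases : List (List (String × String))) (out : List (List (List (String × String)))) : Decidable (Spec_detect_workflow_clusters_py execution_phases out) := by unfold Spec_detect_workflow_clusters_py; infer_instance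

-- ===== CLAIM (what is proved, stated in full; the proofs are below) =====
def Claim_equal_detect_workflow_clusters_py : Prop := ∀ (execution_phases : List (List (String × String))), Dom_detect_workflow_clusters_py execution_phases → Pre_detect_workflow_clusters_py execution_phases → Spec_detect_workflow_clusters_py execution_phases (detect_workflow_clusters_py execution_phases)

-- ===== LEMMAS AND PROOFS =====
theorem pv_insertBy_app {α : Type} (before : α → α → Bool) (x : α) (ys zs : List α)
    (h1 : ∀ y ∈ ys, before x y = false) (h2 : ∀ z ∈ zs, before x z = true) :
    PySem.List.insertBy before x (ys ++ zs) = ys ++ x :: zs := by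
  induction ys with
  | nil =>
    cases zs with
    | nil => simp [PySem.List.insertBy]
    | cons z zs => simp [PySem.List.insertBy, h2 z (by simp)]
  | cons y ys ih =>
    simp only [List.cons_append, PySem.List.insertBy, h1 y (by simp)]
    simp only [Bool.false_eq_true, ite_false]

    exact congrArg (y :: ·) (ih (fun a ha => h1 a (by simp [ha])))

theorem pv_insert_flatMap (x : Int × List (String × String))
    (f : Int → List (Int × List (String × String)))
    (hf : ∀ p, ∀ e ∈ f p, e.1 = p) (hx : 0 ≤ x.1 ∧ x.1 < 12) :
    PySem.List.insertBy (fun a b => decide (a.1 < b.1)) x ((PySem.List.pyRange 0 12 1).flatMap f) =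
      (PySem.List.pyRange 0 12 1).flatMap (fun p => f p ++ if x.1 == p then [x] else []) := by
  have hsplit : PySem.List.pyRange 0 12 1 =
      (PySem.List.pyRange 0 x.1 1 ++ [x.1]) ++ PySem.List.pyRange (x.1 + 1) 12 1 := by
    rw [← PySem.List.pyRange_one_succ_right hx.1,
        PySem.List.pyRange_one_append 0 (x.1 + 1) 12 (by omega) (by omega)]
  rw [hsplit, List.flatMap_append]
  rw [pv_insertBy_app _ x _ _ ?h1 ?h2]
  case h1 =>
    intro y hy
    rw [List.mem_flatMap] at hy
    obtain ⟨p, hp, hyf⟩ := hy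
    rw [List.mem_append] at hp
    have hple : p ≤ x.1 := by
      rcases hp with hp | hp
      · have := (PySem.List.mem_pyRange_one).mp hp; omega
      · simp at hp; omega
    rw [hf p y hyf]
    simp; omega
  case h2 =>
    intro z hz
    rw [List.mem_flatMap] at hz
    obtain ⟨p, hp, hzf⟩ := hz
    have := (PySem.List.mem_pyRange_one).mp hp
    rw [hf p z hzf]
    simp; omega
  · rw [List.flatMap_append, List.flatMap_append]
    conv_rhs => rw [List.flatMap_append]
    rw [List.flatMap_congr (l := PySem.List.pyRange 0 x.1 1)
        (g := f) (f := fun p => f p ++ if x.1 == p then [x] else []) ?hg1,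
      List.flatMap_congr (l := PySem.List.pyRange (x.1 + 1) 12 1)
        (g := f) (f := fun p => f p ++ if x.1 == p then [x] else []) ?hg2]
    case hg1 =>
      intro p hp
      have := (PySem.List.mem_pyRange_one).mp hp
      have : (x.1 == p) = false := by simp; omega
      simp [this]
    case hg2 =>
      intro p hp
      have := (PySem.List.mem_pyRange_one).mp hp
      have : (x.1 == p) = false := by simp; omega
      simp [this]
    simp [List.flatMap_cons]

theorem pv_sorted_eq_flatMap (l : List (Int × List (String × String)))
    (h : ∀ e ∈ l, 0 ≤ e.1 ∧ e.1 < 12) :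
    PySem.List.sorted l (fun e => e.1) =
      (PySem.List.pyRange 0 12 1).flatMap (fun p => l.filter (fun e => e.1 == p)) := by
  rw [PySem.List.sorted_eq_foldl_insertBy]
  induction l using List.reverseRecOn with
  | nil => simp
  | append_singleton l x ih =>
    rw [List.foldl_append, List.foldl_cons, List.foldl_nil]
    rw [ih (fun e he => h e (by simp [he]))]
    rw [pv_insert_flatMap x _ (fun p e he => by simpa using (List.mem_filter.mp he).2)
        (h x (by simp))]
    apply List.flatMap_congr
    intro p _
    simp [List.filter_append, List.filter_singleton]
theorem pvA_foldl_const (p : Int) (rest : List (List (String × String)))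
    (cl : List (List (List (String × String)))) (cur : List (List (String × String))) :
    List.foldl pvAStep (cl, cur, p) (rest.map (fun ph => (p, ph))) = (cl, cur ++ rest, p) := by
  induction rest generalizing cur with
  | nil => simp
  | cons ph rest ih =>
    simp only [List.map_cons, List.foldl_cons]
    have hstep : pvAStep (cl, cur, p) (p, ph) = (cl, cur ++ [ph], p) := by
      simp [pvAStep]
    rw [hstep, ih]
    simp

theorem pvA_foldl_bucket (p : Int) (bucket : List (List (String × String)))
    (cl : List (List (List (String × String)))) (cur : List (List (String × String))) (last : Int)
    (hinv : last = -1 ∨ cur ≠ []) :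
    List.foldl pvAStep (cl, cur, last) (bucket.map (fun ph => (p, ph))) =
      (if bucket = [] then (cl, cur, last)
       else if last ≠ -1 ∧ p - last > 2 then (cl ++ [cur], bucket, p)
       else (cl, cur ++ bucket, p)) := by
  cases bucket with
  | nil => simp
  | cons ph rest =>
    simp only [List.map_cons, List.foldl_cons]
    by_cases hgap : last ≠ -1 ∧ p - last > 2
    · have hcur : cur ≠ [] := by
        rcases hinv with h | h
        · exact absurd h hgap.1
        · exact h
      have hstep : pvAStep (cl, cur, last) (p, ph) = (cl ++ [cur], [ph], p) := by
        simp [pvAStep, hgap, hcur]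
      rw [hstep, pvA_foldl_const]
      simp [hgap]
    · have hstep : pvAStep (cl, cur, last) (p, ph) = (cl, cur ++ [ph], p) := by
        simp only [pvAStep]
        rw [if_neg hgap]
      rw [hstep, pvA_foldl_const]
      simp [hgap]

theorem pv_foldl_main (xs : List (List (String × String))) (ps : List Int)
    (cl : List (List (List (String × String)))) (cur : List (List (String × String))) (last : Int)
    (hinv : last = -1 ∨ cur ≠ []) :
    List.foldl pvAStep (cl, cur, last)
        (ps.flatMap (fun p => (pvBBucket xs p).map (fun ph => (p, ph)))) =
      List.foldl (pvBStep xs) (cl, cur, last) ps := by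
  induction ps generalizing cl cur last with
  | nil => rfl
  | cons p ps ih =>
    simp only [List.flatMap_cons, List.foldl_append, List.foldl_cons]
    rw [pvA_foldl_bucket p _ cl cur last hinv]
    by_cases hb : pvBBucket xs p = []
    · rw [if_pos hb]
      have : pvBStep xs (cl, cur, last) p = (cl, cur, last) := by simp [pvBStep, hb]
      rw [this]
      exact ih cl cur last hinv
    · rw [if_neg hb]
      by_cases hgap : last ≠ -1 ∧ p - last > 2
      · rw [if_pos hgap]
        have : pvBStep xs (cl, cur, last) p = (cl ++ [cur], pvBBucket xs p, p) := by
          simp only [pvBStep]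
          rw [if_neg hb, if_pos hgap]
        rw [this]
        exact ih _ _ _ (Or.inr hb)
      · rw [if_neg hgap]
        have : pvBStep xs (cl, cur, last) p = (cl, cur ++ pvBBucket xs p, p) := by
          simp only [pvBStep]
          rw [if_neg hb, if_neg hgap]
        rw [this]
        exact ih _ _ _ (Or.inr (by simp [hb]))
theorem pvAPos_bounds (phase : List (String × String)) :
    0 ≤ pvAPos phase ∧ pvAPos phase < 12 := by
  unfold pvAPos
  cases hl : List.lookup "event" phase with
  | none => norm_num
  | some ev =>
    simp only []
    cases hi : PySem.List.index? pvEventOrder ev with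
    | none => norm_num
    | some i =>
      obtain ⟨hk, -, -⟩ := PySem.List.getElem_of_index?_eq_some hi
      have : i < 11 := by simpa [pvEventOrder] using hk
      simp only []
      omega

theorem pvPos_eq (phase : List (String × String))
    (h : (List.lookup "event" phase).isSome) : pvAPos phase = pvBPos phase := by
  unfold pvAPos pvBPos
  cases hl : List.lookup "event" phase with
  | none => rw [hl] at h; simp at h
  | some ev =>
    simp only []
    by_cases h0 : ev = "annotation_status.importing"; · subst h0; decide
    by_cases h1 : ev = "annotation_content.initialize"; · subst h1; decide
    by_cases h2 : ev = "annotation_content.started"; · subst h2; decide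
    by_cases h3 : ev = "annotation_content.updated"; · subst h3; decide
    by_cases h4 : ev = "annotation_status.to_review"; · subst h4; decide
    by_cases h5 : ev = "annotation_status.changed"; · subst h5; decide
    by_cases h6 : ev = "annotation_content.confirm"; · subst h6; decide
    by_cases h7 : ev = "annotation_content.export"; · subst h7; decide
    by_cases h8 : ev = "annotation_status.exporting"; · subst h8; decide
    by_cases h9 : ev = "annotation_status.exported"; · subst h9; decide
    by_cases h10 : ev = "datapoint_value"; · subst h10; decide
    have hni : PySem.List.index? pvEventOrder ev = none := by
      rw [PySem.List.index?_eq_none_iff]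
      simp only [pvEventOrder, List.mem_cons, List.not_mem_nil, or_false, not_or]
      exact ⟨h0, h1, h2, h3, h4, h5, h6, h7, h8, h9, h10⟩
    have hitems : pvPosMap.items =
        [("annotation_status.importing", (0:Int)), ("annotation_content.initialize", 1),
         ("annotation_content.started", 2), ("annotation_content.updated", 3),
         ("annotation_status.to_review", 4), ("annotation_status.changed", 5),
         ("annotation_content.confirm", 6), ("annotation_content.export", 7),
         ("annotation_status.exporting", 8), ("annotation_status.exported", 9),
         ("datapoint_value", 10)] := by decide
    rw [hni]
    have e0 : ("annotation_status.importing" == ev) = false := beq_eq_false_iff_ne.mpr (Ne.symm h0)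
    have e1 : ("annotation_content.initialize" == ev) = false := beq_eq_false_iff_ne.mpr (Ne.symm h1)
    have e2 : ("annotation_content.started" == ev) = false := beq_eq_false_iff_ne.mpr (Ne.symm h2)
    have e3 : ("annotation_content.updated" == ev) = false := beq_eq_false_iff_ne.mpr (Ne.symm h3)
    have e4 : ("annotation_status.to_review" == ev) = false := beq_eq_false_iff_ne.mpr (Ne.symm h4)
    have e5 : ("annotation_status.changed" == ev) = false := beq_eq_false_iff_ne.mpr (Ne.symm h5)
    have e6 : ("annotation_content.confirm" == ev) = false := beq_eq_false_iff_ne.mpr (Ne.symm h6)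
    have e7 : ("annotation_content.export" == ev) = false := beq_eq_false_iff_ne.mpr (Ne.symm h7)
    have e8 : ("annotation_status.exporting" == ev) = false := beq_eq_false_iff_ne.mpr (Ne.symm h8)
    have e9 : ("annotation_status.exported" == ev) = false := beq_eq_false_iff_ne.mpr (Ne.symm h9)
    have e10 : ("datapoint_value" == ev) = false := beq_eq_false_iff_ne.mpr (Ne.symm h10)
    simp [PySem.Dict.getD, PySem.Dict.get?, hitems, List.find?,
      e0, e1, e2, e3, e4, e5, e6, e7, e8, e9, e10]
-- ===== VERDICT (by name: the statement is the Claim_ definition above) =====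
theorem detect_workflow_clusters_py_spec : Claim_equal_detect_workflow_clusters_py := by
  intro xs hdom hpre
  unfold Spec_detect_workflow_clusters_py
  by_cases hnil : xs = []
  · subst hnil; decide
  · unfold detect_workflow_clusters_py detect_workflow_clusters_py_alt
    rw [if_neg hnil]
    have hpp : ∀ e ∈ xs.map (fun ph => (pvAPos ph, ph)), 0 ≤ e.1 ∧ e.1 < 12 := by
      intro e he
      rw [List.mem_map] at he
      obtain ⟨ph, -, rfl⟩ := he
      exact pvAPos_bounds ph
    have hfilter : ∀ p, (xs.map (fun ph => (pvAPos ph, ph))).filter (fun e => e.1 == p)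
        = (pvBBucket xs p).map (fun ph => (p, ph)) := by
      intro p
      rw [List.filter_map]
      unfold pvBBucket
      have hq : ∀ ph ∈ xs,
          ((fun e => e.1 == p) ∘ (fun ph => (pvAPos ph, ph))) ph = (pvBPos ph == p) := by
        intro ph hph
        simp [pvPos_eq ph (hpre ph hph)]
      rw [List.filter_congr hq]
      apply List.map_congr_left
      intro ph hph
      have hmem := List.mem_filter.mp hph
      have : pvBPos ph = p := by simpa using hmem.2
      rw [← this, pvPos_eq ph (hpre ph (hmem.1))]
    simp only [pv_sorted_eq_flatMap _ hpp]
    rw [List.flatMap_congr (fun p _ => hfilter p)]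
    rw [pv_foldl_main xs _ [] [] (-1) (Or.inl rfl)]
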